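-- pv_equiv track=rewrite | github.com/Raiden-08/code-atlas | src/services/graph.py | build_function_index
-- ===== SOURCE A (Python) =====
-- def build_function_index(functions):
--     """
--     Map function name → list of function objects
--     """
--     index = {}
--
--     for f in functions:
--         name = f["name"]
--         if name not in index:
--             index[name] = []
--         index[name].append(f)
--
--     return index
-- ===== SOURCE B (Python) =====
-- def build_function_index(functions):
--     """
--     Map function name → list of function objects
--     """
--     names = list(dict.fromkeys(f["name"] for f in functions))
--     return {name: [f for f in functions if f["name"] == name] for name in names}
-- ===== Notes on version B (the rewrite author's own statement) =====
-- stated objective: alternative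
-- what changed: Replaces the single hash-accumulation pass with a two-phase decomposition: first collect the distinct names in first-appearance order (dict.fromkeys), then build each group by filtering the whole list per name in a dict comprehension.
import Mathlib
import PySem

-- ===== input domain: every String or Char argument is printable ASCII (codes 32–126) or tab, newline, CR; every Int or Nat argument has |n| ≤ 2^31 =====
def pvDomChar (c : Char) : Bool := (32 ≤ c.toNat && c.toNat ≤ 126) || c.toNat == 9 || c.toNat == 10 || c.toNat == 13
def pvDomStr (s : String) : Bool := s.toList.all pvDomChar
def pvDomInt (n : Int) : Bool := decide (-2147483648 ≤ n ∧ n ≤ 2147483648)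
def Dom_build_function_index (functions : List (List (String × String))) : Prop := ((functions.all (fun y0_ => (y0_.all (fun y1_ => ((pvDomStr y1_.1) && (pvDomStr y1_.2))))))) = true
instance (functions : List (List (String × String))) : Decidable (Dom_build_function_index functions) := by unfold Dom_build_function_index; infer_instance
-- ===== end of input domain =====

-- B groups by a different decomposition: distinct names first, then one filter per name (same value, no speed claim).

-- ===== PORT A =====
-- shared helper: the Python expression f["name"] (dict lookup; default "" is unreachable under Pre_)
def pvKey (f : List (String × String)) : String :=
  ((PySem.Dict.ofList f).get? "name").getD ""

def build_function_index (functions : List (List (String × String))) : List (String × List (List (String × String))) :=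
  (functions.foldl (fun index f =>
      let name := pvKey f
      let index := if !(index.contains name) then index.insert name ([] : List (List (String × String))) else index
      index.modify name [] (fun l => l ++ [f]))
    PySem.Dict.empty).items

-- ===== PORT B =====
def build_function_index_alt (functions : List (List (String × String))) : List (String × List (List (String × String))) :=
  let names := PySem.List.dedup (functions.map pvKey)
  names.map (fun n => (n, functions.filter (fun f => pvKey f == n)))

-- ===== PRECONDITION & SPEC =====
-- Pre_ excludes inputs where some function dict lacks the key "name": there Python A raises KeyError (B raises too).
def Pre_build_function_index (functions : List (List (String × String))) : Prop :=
  (functions.all (fun f => (PySem.Dict.ofList f).contains "name")) = true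
instance (functions : List (List (String × String))) : Decidable (Pre_build_function_index functions) := by unfold Pre_build_function_index; infer_instance

def pvWitness_build_function_index : (List (List (String × String))) := [[("name", "a")], [("name", "b")], [("name", "a")]]

def Spec_build_function_index (functions : List (List (String × String))) (out : List (String × List (List (String × String)))) : Prop := out = build_function_index_alt functions
instance (functions : List (List (String × String))) (out : List (String × List (List (String × String)))) : Decidable (Spec_build_function_index functions out) := by unfold Spec_build_function_index; infer_instance

-- ===== CLAIM (what is proved, stated in full; the proofs are below) =====
def Claim_equal_build_function_index : Prop := ∀ (functions : List (List (String × String))), Dom_build_function_index functions → Pre_build_function_index functions → Spec_build_function_index functions (build_function_index functions)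

-- ===== LEMMAS AND PROOFS =====

-- A's loop body (insert-if-missing, then append) is extensionally one modify with default []
lemma pvStep_eq_modify (d : PySem.Dict String (List (List (String × String)))) (f : List (String × String)) :
    (let name := pvKey f
     let index := if !(d.contains name) then d.insert name ([] : List (List (String × String))) else d
     index.modify name [] (fun l => l ++ [f]))
    = d.modify (pvKey f) [] (fun l => l ++ [f]) := by
  by_cases h : d.contains (pvKey f)
  · simp [h]
  · have h' : d.contains (pvKey f) = false := by simpa using h
    have hall : ∀ p ∈ d.items, ¬(p.1 = pvKey f) := by
      simpa [PySem.Dict.contains, List.any_eq_false] using h'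
    simp only [h', Bool.not_false, if_pos]
    apply PySem.Dict.ext
    rw [PySem.Dict.modify, PySem.Dict.modify,
        PySem.Dict.getD_insert_self,
        PySem.Dict.getD_of_not_contains d _ h',
        PySem.Dict.items_insert_of_contains _ _ (PySem.Dict.contains_insert_self ..),
        PySem.Dict.items_insert_of_not_contains _ _ h',
        PySem.Dict.items_insert_of_not_contains d _ h',
        List.map_append]
    refine congrArg₂ _ ?_ (by simp)
    exact (List.map_congr_left (fun p hp => by simp [hall p hp])).trans (List.map_id _)

-- the whole loop, rewritten into the bare modify fold
lemma pvFoldl_eq (functions : List (List (String × String))) :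
    functions.foldl (fun index f =>
      let name := pvKey f
      let index := if !(index.contains name) then index.insert name ([] : List (List (String × String))) else index
      index.modify name [] (fun l => l ++ [f])) PySem.Dict.empty
    = functions.foldl (fun d f => d.modify (pvKey f) [] (fun l => l ++ [f])) PySem.Dict.empty :=
  PySem.List.foldl_congr_mem _ _ _ _ (fun d f _ => pvStep_eq_modify d f)

-- ===== VERDICT (by name: the statement is the Claim_ definition above) =====
theorem build_function_index_spec : Claim_equal_build_function_index := by
  intro functions _ _
  show _ = _
  unfold build_function_index build_function_index_alt
  rw [pvFoldl_eq]
  set d := functions.foldl (fun d f => d.modify (pvKey f) [] (fun l => l ++ [f])) PySem.Dict.empty with hd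
  have hfold : d = (functions.map (fun f => (pvKey f, f))).foldl
      (fun d p => d.modify p.1 [] (fun l => l ++ [p.2])) PySem.Dict.empty := by
    rw [List.foldl_map]
  have hkeys : d.keys = PySem.List.dedup (functions.map pvKey) := by
    rw [hd, PySem.Dict.keys_foldl_modify_key]
    simp [PySem.Dict.keys_empty, PySem.Set.update_nil_left, PySem.List.dedup]
  have hnodup : d.keys.Nodup := by
    rw [hd]
    exact PySem.Dict.nodup_keys_foldl_modify_key _ _ _ _ _ (by simp [PySem.Dict.keys_empty])
  have hget : ∀ n, d.getD n [] = functions.filter (fun f => pvKey f == n) := by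
    intro n
    rw [hfold, PySem.Dict.getD_foldl_modify_append]
    simp [PySem.Dict.getD_empty, List.filter_map, Function.comp_def, List.map_map]
  rw [PySem.Dict.items_eq_map_keys d hnodup ([] : List (List (String × String))), hkeys]
  exact List.map_congr_left (fun n _ => by rw [hget n])
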